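-- pv_equiv track=rewrite | github.com/JacobFrericks/JacobFrericks | build_portfolio.py | format_readme
-- ===== SOURCE A (Python) =====
-- def format_readme(readme, url):
--     lines = []
--     count = 0
--     for line in readme.split('\n'):
--       if line:
--         if count == 0:
--             # Remove '#'
--             line = line.replace("# ", "")
--             # Create a link to the project
--             line = f"# [{line}]({url})"
--         lines.append(line)
--         count = count+1
--       else:
--         break
--     return "\n".join(lines)
-- ===== SOURCE B (Python) =====
-- def format_readme(readme, url):
--     # Cut at the first blank-line separator "\n\n" in one string operation,
--     # then split that prefix into lines; no per-line loop or break.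
--     block = readme.split('\n\n', 1)[0].split('\n')
--     if block[-1] == '':
--         block.pop()
--     if not block or block[0] == '':
--         return ""
--     block[0] = f"# [{block[0].replace('# ', '')}]({url})"
--     return '\n'.join(block)
-- ===== Notes on version B (the rewrite author's own statement) =====
-- stated objective: alternative
-- what changed: B finds the block boundary with a single string-level split at the first '\n\n' separator (split('\n\n', 1)[0]) and a trailing-empty-line pop, instead of A's per-line loop with a break and a count flag.
import Mathlib
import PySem

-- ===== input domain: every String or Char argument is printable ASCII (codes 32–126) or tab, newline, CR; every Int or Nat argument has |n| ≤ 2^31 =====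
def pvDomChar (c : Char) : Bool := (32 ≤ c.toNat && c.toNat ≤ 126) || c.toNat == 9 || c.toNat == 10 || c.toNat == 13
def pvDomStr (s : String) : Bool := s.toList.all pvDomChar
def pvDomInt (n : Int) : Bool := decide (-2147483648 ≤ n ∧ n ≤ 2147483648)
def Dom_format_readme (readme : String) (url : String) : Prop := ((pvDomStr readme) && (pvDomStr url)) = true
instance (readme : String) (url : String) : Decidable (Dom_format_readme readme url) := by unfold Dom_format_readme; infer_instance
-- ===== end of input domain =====

-- B cuts the readme at the first '\n\n' separator with one maxsplit-1 split (plus a trailing-empty-line pop)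
-- instead of A's per-line loop with a break and a count flag; objective: alternative.

-- ===== PORT A =====
-- A's loop: accumulates lines, counting, transforming the first line inline; breaks on an empty line.
def pvALoop (url : String) : List String → Nat → List String → List String
  | [], _, lines => lines
  | line :: rest, count, lines =>
    if line ≠ "" then
      let line' := if count = 0 then
          "# [" ++ PySem.Str.replace line "# " "" ++ "](" ++ url ++ ")"
        else line
      pvALoop url rest (count + 1) (lines ++ [line'])
    else lines

def format_readme (readme : String) (url : String) : String :=
  PySem.Str.join "\n" (pvALoop url (((PySem.Str.split? readme "\n").getD [])) 0 [])

-- ===== PORT B =====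
def format_readme_alt (readme : String) (url : String) : String :=
  -- block = readme.split('\n\n', 1)[0].split('\n')   (split(sep, 1) is never empty, so [0] is total)
  let first := (PySem.List.pyGet? ((PySem.Str.splitMax? readme "\n\n" 1).getD []) 0).getD ""
  let block0 := (PySem.Str.split? first "\n").getD []
  -- if block[-1] == '': block.pop()   (block0 is never empty; [-1] is its last element)
  let block := if block0.getLast? = some "" then block0.dropLast else block0
  -- if not block or block[0] == '': return ""; else format the head and join
  match block with
  | [] => ""
  | h :: t =>
    if h = "" then ""
    else PySem.Str.join "\n" (("# [" ++ PySem.Str.replace h "# " "" ++ "](" ++ url ++ ")") :: t)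

-- ===== PRECONDITION & SPEC =====
def Spec_format_readme (readme : String) (url : String) (out : String) : Prop := out = format_readme_alt readme url
instance (readme : String) (url : String) (out : String) : Decidable (Spec_format_readme readme url out) := by unfold Spec_format_readme; infer_instance

-- ===== CLAIM (what is proved, stated in full; the proofs are below) =====
def Claim_equal_format_readme : Prop := ∀ (readme : String) (url : String), Dom_format_readme readme url → Spec_format_readme readme url (format_readme readme url)

-- ===== LEMMAS AND PROOFS =====

-- structural model of s.split('\n') on char lists
def pvLines : List Char → List (List Char)
  | [] => [[]]
  | c :: r => if c = '\n' then [] :: pvLines r else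
      match pvLines r with
      | [] => [[c]]
      | h :: t => (c :: h) :: t

-- structural model of the prefix before the first '\n\n'
def pvCut : List Char → List Char
  | [] => []
  | c :: r => if ['\n','\n'].isPrefixOf (c :: r) then [] else c :: pvCut r

-- takeWhile-nonempty (A's block) and pop-trailing-empty (B's pop), char level
def pvTake : List (List Char) → List (List Char)
  | [] => []
  | h :: t => if h = [] then [] else h :: pvTake t

def pvPop (M : List (List Char)) : List (List Char) :=
  if M.getLast? = some [] then M.dropLast else M

-- string-level twins
def pvBlockS : List String → List String
  | [] => []
  | h :: t => if h = "" then [] else h :: pvBlockS t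

def pvPopS (L : List String) : List String :=
  if L.getLast? = some "" then L.dropLast else L

theorem pvLines_ne_nil (l : List Char) : pvLines l ≠ [] := by
  cases l with
  | nil => simp [pvLines]
  | cons c r =>
    by_cases h : c = '\n'
    · simp [pvLines, h]
    · simp only [pvLines, h]
      rcases hr : pvLines r with _ | ⟨x, xs⟩ <;> simp

theorem pvGo1 (fuel : Nat) (l cur : List Char) (acc : List (List Char)) (hf : l.length ≤ fuel) :
    PySem.Chars.splitOn.go ['\n'] fuel l cur acc =
      acc.reverse ++ (match pvLines l with
        | [] => []
        | h :: t => (cur.reverse ++ h) :: t) := by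
  induction fuel generalizing l cur acc with
  | zero =>
    have : l = [] := by cases l <;> simp_all
    subst this
    rw [PySem.Chars.splitOn.go.eq_def]
    simp [pvLines]
  | succ n ih =>
    cases l with
    | nil =>
      rw [PySem.Chars.splitOn.go.eq_def]
      simp [pvLines]
    | cons c rest =>
      rw [PySem.Chars.splitOn.go.eq_def]
      by_cases hc : c = '\n'
      · subst hc
        have hp : List.isPrefixOf ['\n'] ('\n' :: rest) = true := by
          simp [List.isPrefixOf]
        simp only [hp, if_pos]
        rw [show List.drop (['\n'] : List Char).length ('\n' :: rest) = rest from rfl]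
        rw [ih rest [] (cur.reverse :: acc) (by simpa using Nat.le_of_succ_le_succ hf)]
        rcases hr : pvLines rest with _ | ⟨h, t⟩
        · exact absurd hr (pvLines_ne_nil rest)
        · simp [pvLines, hr]
      · have hp : List.isPrefixOf ['\n'] (c :: rest) = false := by
          simp [List.isPrefixOf]
          exact fun h => absurd h.symm hc
        simp only [hp]
        rw [if_neg (by simp)]
        rw [ih rest (c :: cur) acc (by simpa using Nat.le_of_succ_le_succ hf)]
        rcases hr : pvLines rest with _ | ⟨h, t⟩
        · exact absurd hr (pvLines_ne_nil rest)
        · simp [pvLines, hc, hr]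

theorem pvSplitOn_eq (l : List Char) : PySem.Chars.splitOn l ['\n'] = pvLines l := by
  rw [PySem.Chars.splitOn, pvGo1 (l.length + 1) l [] [] (by omega)]
  rcases hr : pvLines l with _ | ⟨h, t⟩
  · exact absurd hr (pvLines_ne_nil l)
  · simp

theorem pvGoMax0 (fuel : Nat) (l cur : List Char) (acc : List (List Char)) :
    PySem.Chars.splitOnMax.go ['\n','\n'] fuel 0 l cur acc = acc.reverse ++ [cur.reverse ++ l] := by
  cases fuel with
  | zero => rw [PySem.Chars.splitOnMax.go.eq_def]; simp
  | succ n =>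
    cases l with
    | nil => rw [PySem.Chars.splitOnMax.go.eq_def]; simp
    | cons c rest => rw [PySem.Chars.splitOnMax.go.eq_def]; simp

theorem pvGoMax1 (fuel : Nat) (l cur : List Char) (acc : List (List Char)) (hf : l.length ≤ fuel) :
    ∃ t, PySem.Chars.splitOnMax.go ['\n','\n'] fuel 1 l cur acc =
      acc.reverse ++ (cur.reverse ++ pvCut l) :: t := by
  induction fuel generalizing l cur acc with
  | zero =>
    have : l = [] := by cases l <;> simp_all
    subst this
    rw [PySem.Chars.splitOnMax.go.eq_def]
    exact ⟨[], by simp [pvCut]⟩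
  | succ n ih =>
    cases l with
    | nil =>
      rw [PySem.Chars.splitOnMax.go.eq_def]
      exact ⟨[], by simp [pvCut]⟩
    | cons c rest =>
      rw [PySem.Chars.splitOnMax.go.eq_def]
      by_cases hp : List.isPrefixOf ['\n','\n'] (c :: rest) = true
      · simp only [hp, if_pos, if_neg (by omega : ¬ (1 : Nat) = 0)]
        refine ⟨[List.drop 2 (c :: rest)], ?_⟩
        rw [show (1 : Nat) - 1 = 0 from rfl, pvGoMax0]
        simp [pvCut, hp]
      · simp only [hp, if_neg (by omega : ¬ (1 : Nat) = 0), Bool.false_eq_true, if_false]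
        obtain ⟨t, ht⟩ := ih rest (c :: cur) acc (by simpa using Nat.le_of_succ_le_succ hf)
        refine ⟨t, ?_⟩
        rw [ht]
        simp only [pvCut, hp]
        simp

theorem pvSplitOnMax_eq (l : List Char) :
    ∃ t, PySem.Chars.splitOnMax l ['\n','\n'] 1 = pvCut l :: t := by
  rw [PySem.Chars.splitOnMax]
  rw [if_neg (by omega : ¬ (1 : Int) < 0)]
  obtain ⟨t, ht⟩ := pvGoMax1 (l.length + 1) l [] [] (by omega)
  exact ⟨t, by simpa using ht⟩

theorem pvPop_cons {x : List Char} (hx : x ≠ []) (t : List (List Char)) :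
    pvPop (x :: t) = x :: pvPop t := by
  cases t with
  | nil => simp [pvPop, hx]
  | cons y ys =>
    simp only [pvPop, List.getLast?_cons_cons]
    split <;> simp

-- unfolding helpers for pvLines / pvCut on variables
theorem pvLines_nil : pvLines [] = [[]] := rfl

theorem pvLines_nl (r : List Char) : pvLines ('\n' :: r) = [] :: pvLines r := by
  simp [pvLines]

theorem pvLines_cons {c : Char} (hc : c ≠ '\n') {r h : List Char} {t : List (List Char)}
    (hr : pvLines r = h :: t) : pvLines (c :: r) = (c :: h) :: t := by
  simp only [pvLines]
  rw [if_neg hc, hr]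

theorem pvCut_nlnl (r : List Char) : pvCut ('\n' :: '\n' :: r) = [] := by
  simp [pvCut, List.isPrefixOf]

theorem pvCut_cons_ne {c : Char} (hc : c ≠ '\n') (r : List Char) :
    pvCut (c :: r) = c :: pvCut r := by
  rw [pvCut, if_neg]
  simp [List.isPrefixOf]
  rintro h
  exact absurd h.symm hc

theorem pvCut_nl_ne {e : Char} (he : e ≠ '\n') (r : List Char) :
    pvCut ('\n' :: e :: r) = '\n' :: pvCut (e :: r) := by
  rw [pvCut, if_neg]
  simp [List.isPrefixOf]
  exact fun h => absurd h.symm he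

theorem pvCut_nl_nil : pvCut ['\n'] = ['\n'] := rfl

-- MAIN: for readmes not starting with a newline, B's popped block of the '\n\n'-cut prefix
-- equals A's takeWhile-nonempty block of the lines.
theorem pvMain : ∀ (n : Nat) (l : List Char), l.length ≤ n → l.head? ≠ some '\n' →
    pvPop (pvLines (pvCut l)) = pvTake (pvLines l) := by
  intro n
  induction n with
  | zero =>
    intro l hl _
    have : l = [] := by cases l <;> simp_all
    subst this
    simp [pvCut, pvLines, pvPop, pvTake]
  | succ n ih =>
    intro l hl hh
    cases l with
    | nil => simp [pvCut, pvLines, pvPop, pvTake]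
    | cons c r =>
      have hc : c ≠ '\n' := by simpa using hh
      cases r with
      | nil =>
        rw [pvCut_cons_ne hc, show pvCut [] = [] from rfl,
            pvLines_cons hc pvLines_nil]
        simp [pvPop, pvTake]
      | cons d r2 =>
        by_cases hd : d = '\n'
        · subst hd
          cases r2 with
          | nil =>
            rw [pvCut_cons_ne hc, pvCut_nl_nil, pvLines_cons hc (pvLines_nl [])]
            simp [pvPop, pvTake, pvLines]
          | cons e r3 =>
            by_cases he : e = '\n'
            · subst he
              rw [pvCut_cons_ne hc, pvCut_nlnl, pvLines_cons hc pvLines_nil,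
                  pvLines_cons hc (pvLines_nl ('\n' :: r3)), pvLines_nl r3]
              simp [pvPop, pvTake]
            · rw [pvCut_cons_ne hc, pvCut_nl_ne he,
                  pvLines_cons hc (pvLines_nl (pvCut (e :: r3))),
                  pvLines_cons hc (pvLines_nl (e :: r3))]
              rw [pvPop_cons (by simp) _]
              have hih := ih (e :: r3) (by simp at hl ⊢; omega) (by simpa using he)
              rw [hih]
              simp [pvTake]
        · -- l = c :: d :: r2, d ≠ '\n': peel one char off both sides
          have hih := ih (d :: r2) (by simp at hl ⊢; omega) (by simpa using hd)
          rcases hq : pvLines (pvCut r2) with _ | ⟨h, t⟩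
          · exact absurd hq (pvLines_ne_nil _)
          · rcases hq2 : pvLines r2 with _ | ⟨h', t'⟩
            · exact absurd hq2 (pvLines_ne_nil _)
            · have h2 : pvLines (pvCut (d :: r2)) = (d :: h) :: t := by
                rw [pvCut_cons_ne hd, pvLines_cons hd hq]
              have h4 : pvLines (d :: r2) = (d :: h') :: t' := pvLines_cons hd hq2
              rw [pvCut_cons_ne hc, pvLines_cons hc h2, pvLines_cons hc h4]
              rw [h2, h4, pvPop_cons (by simp) t] at hih
              have hih' : (d :: h) :: pvPop t = (d :: h') :: pvTake t' := by
                simpa [pvTake] using hih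
              simp only [List.cons.injEq] at hih'
              obtain ⟨⟨-, e1⟩, e2⟩ := hih'
              rw [pvPop_cons (by simp) t, pvTake, if_neg (by simp), e1, e2]

-- ===== string/char bridging =====
theorem pvStrInj {a b : String} (h : a.toList = b.toList) : a = b := by
  have := congrArg String.ofList h
  simpa using this

theorem pvStrNilIff {s : String} : s.toList = [] ↔ s = "" := by
  constructor
  · intro h; exact pvStrInj (by simpa using h)
  · rintro rfl; rfl

theorem pvBlockS_map (L : List String) :
    (pvBlockS L).map String.toList = pvTake (L.map String.toList) := by
  induction L with
  | nil => simp [pvBlockS, pvTake]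
  | cons hd tl ih =>
    by_cases h : hd = ""
    · subst h; simp [pvBlockS, pvTake]
    · rw [pvBlockS, if_neg h]
      simp only [List.map_cons, pvTake]
      rw [if_neg (fun hh => h (pvStrNilIff.mp hh)), ih]

theorem pvPopS_map (L : List String) :
    (pvPopS L).map String.toList = pvPop (L.map String.toList) := by
  unfold pvPopS pvPop
  rw [List.getLast?_map]
  by_cases h : L.getLast? = some ""
  · rw [if_pos h, if_pos (by rw [h]; rfl), List.map_dropLast]
  · rw [if_neg h, if_neg ?_]
    cases hg : L.getLast? with
    | none => simp
    | some x =>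
      simp only [Option.map_some, Option.some.injEq]
      intro hx
      exact h (by rw [hg, pvStrNilIff.mp hx])

theorem pvBlockS_head_ne {L : List String} {h : String} {t : List String}
    (he : pvBlockS L = h :: t) : h ≠ "" := by
  cases L with
  | nil => simp [pvBlockS] at he
  | cons x xs =>
    by_cases hx : x = ""
    · rw [pvBlockS, if_pos hx] at he; cases he
    · rw [pvBlockS, if_neg hx] at he
      cases he; exact hx

-- ===== A's loop in terms of pvBlockS =====
theorem pvALoop_tail (url : String) (ls : List String) (c : Nat) (acc : List String) (hc : c ≠ 0) :
    pvALoop url ls c acc = acc ++ pvBlockS ls := by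
  induction ls generalizing c acc with
  | nil => simp [pvALoop, pvBlockS]
  | cons l rest ih =>
    by_cases h : l = ""
    · simp [pvALoop, pvBlockS, h]
    · simp [pvALoop, pvBlockS, h, hc, ih (c + 1) _ (Nat.succ_ne_zero c)]

theorem pvLoop_eq (url : String) (ls : List String) :
    PySem.Str.join "\n" (pvALoop url ls 0 []) =
      match pvBlockS ls with
      | [] => ""
      | h :: t => PySem.Str.join "\n" (("# [" ++ PySem.Str.replace h "# " "" ++ "](" ++ url ++ ")") :: t) := by
  cases ls with
  | nil => simp [pvALoop, pvBlockS, PySem.Str.join]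
  | cons l rest =>
    by_cases h : l = ""
    · simp [pvALoop, pvBlockS, h, PySem.Str.join]
    · simp [pvALoop, pvBlockS, h, pvALoop_tail url rest 1 _ (Nat.one_ne_zero)]

-- ===== the split results of the two ports, as char-level values =====
theorem pvSplitA (readme : String) :
    ∃ LS, PySem.Str.split? readme "\n" = some LS ∧
      LS.map String.toList = pvLines readme.toList := by
  have hb := PySem.Str.split?_map readme "\n"
  rw [show ("\n" : String).toList = ['\n'] by decide] at hb
  rw [PySem.Chars.split?, if_neg (by simp), pvSplitOn_eq] at hb
  cases hs : PySem.Str.split? readme "\n" with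
  | none => rw [hs] at hb; cases hb
  | some LS =>
    rw [hs] at hb
    exact ⟨LS, rfl, by simpa using hb⟩

theorem pvSplitB (readme : String) :
    ∃ m0 MS, PySem.Str.splitMax? readme "\n\n" 1 = some (m0 :: MS) ∧
      m0.toList = pvCut readme.toList := by
  have hb := PySem.Str.splitMax?_map readme "\n\n" 1
  rw [show ("\n\n" : String).toList = ['\n','\n'] by decide] at hb
  rw [PySem.Chars.splitMax?, if_neg (by simp)] at hb
  obtain ⟨t, ht⟩ := pvSplitOnMax_eq readme.toList
  rw [ht] at hb
  cases hs : PySem.Str.splitMax? readme "\n\n" 1 with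
  | none => rw [hs] at hb; cases hb
  | some MS0 =>
    rw [hs] at hb
    simp only [Option.map_some, Option.some.injEq] at hb
    cases MS0 with
    | nil => cases hb
    | cons m0 MS =>
      simp only [List.map_cons, List.cons.injEq] at hb
      exact ⟨m0, MS, rfl, hb.1⟩

-- B's port, reduced to pvPopS of the line split of the cut prefix
theorem pvAltEq (readme url : String) {m0 : String} {MS : List String}
    (hs : PySem.Str.splitMax? readme "\n\n" 1 = some (m0 :: MS)) :
    ∃ BS, (PySem.Str.split? m0 "\n").getD [] = BS ∧
      BS.map String.toList = pvLines m0.toList ∧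
      format_readme_alt readme url =
        (match pvPopS BS with
          | [] => ""
          | h :: t =>
            if h = "" then ""
            else PySem.Str.join "\n" (("# [" ++ PySem.Str.replace h "# " "" ++ "](" ++ url ++ ")") :: t)) := by
  obtain ⟨BS, hbs, hmap⟩ := pvSplitA m0
  refine ⟨BS, by rw [hbs]; rfl, hmap, ?_⟩
  unfold format_readme_alt
  rw [hs]
  simp only [Option.getD_some]
  rw [show (PySem.List.pyGet? (m0 :: MS) 0).getD "" = m0 by
    simp [PySem.List.pyGet?, PySem.List.pyIdx?]]
  rw [hbs]
  simp only [Option.getD_some]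
  rfl

theorem pvPopS_head_nil (BS2 : List String) :
    pvPopS ("" :: BS2) = [] ∨ ∃ t, pvPopS ("" :: BS2) = "" :: t := by
  cases BS2 with
  | nil => left; simp [pvPopS]
  | cons y ys =>
    right
    unfold pvPopS
    rw [List.getLast?_cons_cons]
    by_cases h : (y :: ys).getLast? = some ""
    · rw [if_pos h]; exact ⟨(y :: ys).dropLast, by simp⟩
    · rw [if_neg h]; exact ⟨y :: ys, rfl⟩



theorem pvCutNl (r : List Char) : ∃ M, pvLines (pvCut ('\n' :: r)) = [] :: M := by
  cases r with
  | nil => exact ⟨[[]], rfl⟩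
  | cons e r2 =>
    by_cases he : e = '\n'
    · subst he; rw [pvCut_nlnl]; exact ⟨[], rfl⟩
    · rw [pvCut_nl_ne he, pvLines_nl]; exact ⟨_, rfl⟩

theorem pvHeadEmpty {L : List String} {M : List (List Char)}
    (h : L.map String.toList = [] :: M) : ∃ L2, L = "" :: L2 := by
  cases L with
  | nil => cases h
  | cons x xs =>
    simp only [List.map_cons, List.cons.injEq] at h
    exact ⟨xs, by rw [pvStrNilIff.mp h.1]⟩

-- ===== VERDICT (by name: the statement is the Claim_ definition above) =====
theorem format_readme_spec : Claim_equal_format_readme := by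
  intro readme url _
  show format_readme readme url = format_readme_alt readme url
  obtain ⟨LS, hLS, hLmap⟩ := pvSplitA readme
  obtain ⟨m0, MS, hMS, hm0⟩ := pvSplitB readme
  obtain ⟨BS, hBS, hBmap, hAlt⟩ := pvAltEq readme url hMS
  rw [hm0] at hBmap
  have hA : format_readme readme url =
      (match pvBlockS LS with
        | [] => ""
        | h :: t => PySem.Str.join "\n" (("# [" ++ PySem.Str.replace h "# " "" ++ "](" ++ url ++ ")") :: t)) := by
    unfold format_readme
    rw [hLS]
    exact pvLoop_eq url LS
  rw [hA, hAlt]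
  by_cases hn : readme.toList.head? = some '\n'
  · -- readme starts with a newline: both sides are ""
    cases hrl : readme.toList with
    | nil => rw [hrl] at hn; cases hn
    | cons c r =>
      rw [hrl] at hn
      have hc : c = '\n' := by simpa using hn
      subst hc
      rw [hrl] at hLmap hBmap
      -- A side: LS starts with ""
      rw [pvLines_nl] at hLmap
      obtain ⟨L2, hL2⟩ := pvHeadEmpty hLmap
      rw [hL2]
      -- B side: BS starts with ""
      obtain ⟨M, hM⟩ := pvCutNl r
      rw [hM] at hBmap
      obtain ⟨BS2, hBS2⟩ := pvHeadEmpty hBmap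
      rw [hBS2]
      rcases pvPopS_head_nil BS2 with hp | ⟨t, hp⟩
      · rw [hp]; rw [pvBlockS, if_pos rfl]
      · rw [hp, pvBlockS, if_pos rfl]
        simp
  · -- main case: the blocks agree
    have hmain := pvMain readme.toList.length readme.toList le_rfl hn
    have hmap2 : (pvPopS BS).map String.toList = (pvBlockS LS).map String.toList := by
      rw [pvPopS_map, pvBlockS_map, hBmap, hLmap, hmain]
    have heq : pvPopS BS = pvBlockS LS :=
      (List.map_injective_iff.mpr (fun a b h => pvStrInj h)) hmap2
    rw [heq]
    cases hb : pvBlockS LS with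
    | nil => rfl
    | cons h t =>
      have hne := pvBlockS_head_ne hb
      simp [hne]
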